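-- pv_equiv track=rewrite | github.com/fergusleen/Amshole | tools/validate_frames.py | plus_outside_strings
-- ===== SOURCE A (Python) =====
-- def plus_outside_strings(text):
--     in_str = False
--     esc = False
--     for ch in text:
--         if in_str:
--             if esc:
--                 esc = False
--             elif ch == '\\':
--                 esc = True
--             elif ch == '"':
--                 in_str = False
--         else:
--             if ch == '"':
--                 in_str = True
--             elif ch == '+':
--                 return True
--     return False
-- ===== SOURCE B (Python) =====
-- def plus_outside_strings(text):
--     i, n = 0, len(text)
--     while i < n:
--         ch = text[i]
--         if ch == '"':
--             i += 1
--             while i < n: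
--                 if text[i] == '\\':
--                     i += 2
--                 elif text[i] == '"':
--                     i += 1
--                     break
--                 else:
--                     i += 1
--         elif ch == '+':
--             return True
--         else:
--             i += 1
--     return False
-- ===== Notes on version B (the rewrite author's own statement) =====
-- stated objective: alternative
-- what changed: Replaces A's flag-machine (in_str/esc booleans threaded through one for-loop) with an index-based while loop that, on an opening double quote, consumes the whole string literal in a nested span-skipping inner loop (advancing two positions past a backslash escape), so no state flags exist.
import Mathlib
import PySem

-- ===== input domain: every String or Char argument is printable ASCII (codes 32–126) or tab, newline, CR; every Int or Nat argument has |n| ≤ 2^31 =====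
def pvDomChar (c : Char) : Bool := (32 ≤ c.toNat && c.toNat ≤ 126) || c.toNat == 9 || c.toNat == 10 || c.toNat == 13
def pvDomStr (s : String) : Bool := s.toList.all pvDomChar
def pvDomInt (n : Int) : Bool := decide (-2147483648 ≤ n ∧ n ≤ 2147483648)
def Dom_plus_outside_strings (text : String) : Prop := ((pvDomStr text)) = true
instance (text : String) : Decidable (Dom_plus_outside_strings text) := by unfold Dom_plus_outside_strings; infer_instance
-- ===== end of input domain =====

-- B replaces A's in_str/esc flag machine by nested span-skipping control flow (alternative decomposition, same cost).

-- ===== PORT A =====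
-- A's for-loop threading the two flags in_str/esc, with early return on '+'.
def pvGoA : List Char → Bool → Bool → Bool
  | [], _, _ => false
  | ch :: rest, in_str, esc =>
    if in_str then
      if esc then pvGoA rest in_str false
      else if ch = '\\' then pvGoA rest in_str true
      else if ch = '"' then pvGoA rest false esc
      else pvGoA rest in_str esc
    else
      if ch = '"' then pvGoA rest true esc
      else if ch = '+' then true
      else pvGoA rest in_str esc

def plus_outside_strings (text : String) : Bool := pvGoA text.toList false false

-- ===== PORT B =====
-- B's inner while loop: consume a whole string literal (advance 2 past a backslash,
-- stop after a closing '"', also stop at end of text); returns the remaining suffix.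
def pvSkipStr : List Char → List Char
  | [] => []
  | c :: rest =>
    if c = '\\' then
      match rest with
      | [] => []
      | _ :: r => pvSkipStr r
    else if c = '"' then rest
    else pvSkipStr rest

-- equation lemmas for pvSkipStr (cited by pvGoB's decreasing_by and the proofs)
theorem pvSkip_nil : pvSkipStr [] = [] := rfl
theorem pvSkip_bs_nil : pvSkipStr ['\\'] = [] := rfl
theorem pvSkip_bs (x : Char) (r : List Char) : pvSkipStr ('\\' :: x :: r) = pvSkipStr r := rfl
theorem pvSkip_quote (rest : List Char) : pvSkipStr ('"' :: rest) = rest := by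
  rw [pvSkipStr.eq_def]
  norm_num
  intro h
  exact absurd h (by decide)
theorem pvSkip_other (c : Char) (rest : List Char) (h1 : c ≠ '\\') (h2 : c ≠ '"') :
    pvSkipStr (c :: rest) = pvSkipStr rest := by
  rw [pvSkipStr.eq_def]
  simp [h1, h2]

theorem pvSkipStr_length : ∀ (n : Nat) (l : List Char), l.length ≤ n → (pvSkipStr l).length ≤ l.length := by
  intro n
  induction n with
  | zero =>
    intro l hl
    have : l = [] := List.eq_nil_of_length_eq_zero (Nat.le_zero.mp hl)
    subst this; simp [pvSkip_nil]
  | succ n ih =>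
    intro l hl
    match l with
    | [] => simp [pvSkip_nil]
    | c :: rest =>
      have hrest : rest.length ≤ n := by simp at hl; omega
      by_cases hb : c = '\\'
      · subst hb
        cases rest with
        | nil => simp [pvSkip_bs_nil]
        | cons x r =>
          have hr : r.length ≤ n := by simp at hrest; omega
          have := ih r hr
          simp [pvSkip_bs]; omega
      · by_cases hq : c = '"'
        · subst hq; simp [pvSkip_quote]
        · have := ih rest hrest
          simp [pvSkip_other c rest hb hq]; omega

-- B's outer while loop over the text.
def pvGoB : List Char → Bool
  | [] => false
  | c :: rest =>
    if c = '"' then pvGoB (pvSkipStr rest)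
    else if c = '+' then true
    else pvGoB rest
termination_by l => l.length
decreasing_by
  · have := pvSkipStr_length rest.length rest le_rfl; simp; omega
  · simp

def plus_outside_strings_alt (text : String) : Bool := pvGoB text.toList

-- ===== PRECONDITION & SPEC =====
def Spec_plus_outside_strings (text : String) (out : Bool) : Prop := out = plus_outside_strings_alt text
instance (text : String) (out : Bool) : Decidable (Spec_plus_outside_strings text out) := by unfold Spec_plus_outside_strings; infer_instance

-- ===== CLAIM (what is proved, stated in full; the proofs are below) =====
def Claim_equal_plus_outside_strings : Prop := ∀ (text : String), Dom_plus_outside_strings text → Spec_plus_outside_strings text (plus_outside_strings text)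

-- ===== LEMMAS AND PROOFS =====

-- Joint invariant: outside a string the two scanners agree; inside a string (esc clear)
-- A's flag machine equals B run on the suffix after the literal.
theorem pvGo_agree : ∀ (n : Nat) (l : List Char), l.length ≤ n →
    pvGoA l false false = pvGoB l ∧ pvGoA l true false = pvGoB (pvSkipStr l) := by
  intro n
  induction n with
  | zero =>
    intro l hl
    have : l = [] := List.eq_nil_of_length_eq_zero (Nat.le_zero.mp hl)
    subst this
    simp [pvGoA, pvGoB, pvSkipStr]
  | succ n ih =>
    intro l hl
    match l with
    | [] => simp [pvGoA, pvGoB, pvSkipStr]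
    | c :: rest =>
      have hrest : rest.length ≤ n := by simpa using Nat.lt_succ_iff.mp (Nat.lt_of_lt_of_le (by simp) hl)
      constructor
      · -- outside a string
        by_cases hq : c = '"'
        · simp [pvGoA, pvGoB, hq, (ih rest hrest).2]
        · by_cases hp : c = '+'
          · simp [pvGoA, pvGoB, hp]
          · simp [pvGoA, pvGoB, hq, hp, (ih rest hrest).1]
      · -- inside a string, esc clear
        by_cases hb : c = '\\'
        · subst hb
          cases rest with
          | nil => simp [pvGoA, pvSkip_bs_nil, pvGoB]
          | cons x r =>
            have hr : r.length ≤ n := by simp at hrest; omega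
            -- A: esc set, next char consumed; B: skip two chars
            simp [pvGoA, pvSkip_bs, (ih r hr).2]
        · by_cases hq : c = '"'
          · subst hq; simp [pvGoA, pvSkip_quote, (ih rest hrest).1]
          · simp [pvGoA, pvSkip_other c rest hb hq, hb, hq, (ih rest hrest).2]

-- ===== VERDICT (by name: the statement is the Claim_ definition above) =====
theorem plus_outside_strings_spec : Claim_equal_plus_outside_strings := by
  intro text _
  unfold Spec_plus_outside_strings plus_outside_strings plus_outside_strings_alt
  exact (pvGo_agree text.toList.length text.toList le_rfl).1
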